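-- pv_equiv track=rewrite | github.com/JetBrains-Research/lca-baselines | code_completion/eval/composers.py | _get_filelengths
-- ===== SOURCE A (Python) =====
-- from typing import Dict, Any
--
-- def _get_filelengths(context: dict[str, str]) -> Dict[int, str]:
--     set_of_len = set([len(file) for file in context.values()])
--     if len(context) == len(set_of_len):
--         len_to_path = {len(file): path for path, file in context.items()}
--         return len_to_path
--     else:
--         len_to_path = dict()
--         for path, file in context.items():
--             if len(file) not in len_to_path.keys():
--                 len_to_path[len(file)] = path
--             else:
--                 new_key = len(file) + 1
--                 while new_key in len_to_path.keys():
--                     new_key += 1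
--                 len_to_path[new_key] = path
--         return len_to_path
-- ===== SOURCE B (Python) =====
-- from typing import Dict, Any
--
-- def _get_filelengths(context: dict[str, str]) -> Dict[int, str]:
--     # Next-free-slot pointers: nxt[k] points past a block of occupied keys
--     # starting at k; following pointers (with compression at the start key)
--     # finds the smallest unused integer >= len(file) without linear probing.
--     nxt: Dict[int, int] = {}
--     res: Dict[int, str] = {}
--     for path, file in context.items():
--         start = len(file)
--         k = start
--         while k in nxt:
--             k = nxt[k]
--         res[k] = path
--         nxt[k] = k + 1
--         if start != k:
--             nxt[start] = k + 1
--     return res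
-- ===== Notes on version B (the rewrite author's own statement) =====
-- stated objective: faster
-- what changed: Replaces A's linear probing (new_key += 1 scans) and A's separate all-distinct fast path by a single pass that keeps a next-free-slot pointer dict (compressed at the start key) to jump straight to the smallest unused key >= len(file).
import Mathlib
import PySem

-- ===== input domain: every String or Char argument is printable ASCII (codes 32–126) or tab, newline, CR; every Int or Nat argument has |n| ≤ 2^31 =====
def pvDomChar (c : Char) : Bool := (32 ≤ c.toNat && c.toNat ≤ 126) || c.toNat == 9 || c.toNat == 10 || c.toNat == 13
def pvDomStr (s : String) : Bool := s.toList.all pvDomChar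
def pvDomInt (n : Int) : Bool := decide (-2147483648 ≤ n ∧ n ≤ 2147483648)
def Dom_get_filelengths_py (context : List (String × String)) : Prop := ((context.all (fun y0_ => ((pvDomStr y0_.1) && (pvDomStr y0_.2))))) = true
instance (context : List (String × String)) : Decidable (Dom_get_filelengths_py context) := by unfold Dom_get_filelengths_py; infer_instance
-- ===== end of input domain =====

-- B replaces A's linear probing (and A's separate all-distinct fast path) by next-free-slot
-- pointers with compression at the start key; equivalence is about the RETURN value (neither
-- version mutates its argument).

-- ===== PORT A =====
-- 'while new_key in len_to_path.keys(): new_key += 1' — fuel (= size+1) is only a totality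
-- guard: the probed keys are strictly increasing, so the loop always exits within size+1 probes.
def pyWhileNotIn (d : PySem.Dict Int String) : Nat → Int → Int
  | 0, k => k
  | n+1, k => if d.contains k then pyWhileNotIn d n (k+1) else k

def get_filelengths_py (context : List (String × String)) : List (Int × String) :=
  let ctx : PySem.Dict String String := PySem.Dict.ofList context
  let set_of_len : PySem.Set Int := PySem.Set.ofList (ctx.values.map (fun file => PySem.Str.len file))
  if ctx.size = set_of_len.length then
    (PySem.Dict.ofList (ctx.items.map (fun pf => (PySem.Str.len pf.2, pf.1)))).items
  else
    (ctx.items.foldl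
      (fun d pf =>
        if d.contains (PySem.Str.len pf.2) = false then
          d.insert (PySem.Str.len pf.2) pf.1
        else
          d.insert (pyWhileNotIn d (d.size + 1) (PySem.Str.len pf.2 + 1)) pf.1)
      PySem.Dict.empty).items

-- ===== PORT B =====
-- 'while k in nxt: k = nxt[k]' — fuel (= size+1) is only a totality guard: pointer values are
-- strictly increasing keys of nxt, so the chain ends within size+1 steps.
def findFree (nxt : PySem.Dict Int Int) : Nat → Int → Int
  | 0, k => k
  | n+1, k =>
    match nxt.get? k with
    | some v => findFree nxt n v
    | none => k

def get_filelengths_py_alt (context : List (String × String)) : List (Int × String) :=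
  let ctx : PySem.Dict String String := PySem.Dict.ofList context
  (ctx.items.foldl
    (fun st pf =>
      let start := PySem.Str.len pf.2
      let k := findFree st.1 (st.1.size + 1) start
      let res := st.2.insert k pf.1
      let nxt := st.1.insert k (k + 1)
      let nxt := if start ≠ k then nxt.insert start (k + 1) else nxt
      (nxt, res))
    (PySem.Dict.empty, PySem.Dict.empty)).2.items

-- ===== PRECONDITION & SPEC =====
def Spec_get_filelengths_py (context : List (String × String)) (out : List (Int × String)) : Prop := out = get_filelengths_py_alt context
instance (context : List (String × String)) (out : List (Int × String)) : Decidable (Spec_get_filelengths_py context out) := by unfold Spec_get_filelengths_py; infer_instance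

-- ===== CLAIM (what is proved, stated in full; the proofs are below) =====
def Claim_equal_get_filelengths_py : Prop := ∀ (context : List (String × String)), Dom_get_filelengths_py context → Spec_get_filelengths_py context (get_filelengths_py context)

-- ===== LEMMAS AND PROOFS =====

/-- `r` is the smallest integer `≥ k` not in `used`. -/
def IsSFree (used : List Int) (k r : Int) : Prop :=
  k ≤ r ∧ r ∉ used ∧ ∀ j, k ≤ j → j < r → j ∈ used

/-- Reference probe: linear scan for the first free slot (with fuel). -/
def sfreeF (used : List Int) : Nat → Int → Int
  | 0, k => k
  | n+1, k => if k ∈ used then sfreeF used n (k+1) else k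

/-- Reference step: insert at the smallest free slot ≥ len(file). -/
def stepM (d : PySem.Dict Int String) (pf : String × String) : PySem.Dict Int String :=
  d.insert (sfreeF d.keys (d.keys.length + 1) (PySem.Str.len pf.2)) pf.1

theorem isSFree_unique {used : List Int} {k r r' : Int}
    (h : IsSFree used k r) (h' : IsSFree used k r') : r = r' := by
  by_contra hne
  rcases h with ⟨hk, hout, hall⟩
  rcases h' with ⟨hk', hout', hall'⟩
  rcases lt_or_gt_of_ne hne with hlt | hgt
  · exact hout (hall' r hk hlt)
  · exact hout' (hall r' hk' hgt)

theorem isSFree_succ_of_mem {used : List Int} {k r : Int}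
    (hk : k ∈ used) (h : IsSFree used (k+1) r) : IsSFree used k r := by
  obtain ⟨hle, hout, hall⟩ := h
  refine ⟨by omega, hout, fun j hj hjr => ?_⟩
  rcases eq_or_lt_of_le hj with rfl | h1
  · exact hk
  · exact hall j (by omega) hjr

theorem exists_free_le : ∀ (n : Nat) (used : List Int), used.length ≤ n →
    ∀ k : Int, ∃ m, k ≤ m ∧ m ≤ k + n ∧ m ∉ used := by
  intro n
  induction n with
  | zero =>
    intro used hlen k
    exact ⟨k, le_refl _, by omega, by simp [List.eq_nil_of_length_eq_zero (Nat.le_zero.mp hlen)]⟩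
  | succ n ih =>
    intro used hlen k
    by_cases hk : k ∈ used
    · have hlen' : (used.erase k).length ≤ n := by
        have := List.length_erase_of_mem hk
        omega
      obtain ⟨m, h1, h2, h3⟩ := ih (used.erase k) hlen' (k+1)
      refine ⟨m, by omega, by omega, fun hm => ?_⟩
      exact h3 (List.mem_erase_of_ne (by omega) |>.mpr hm)
    · exact ⟨k, le_refl _, by omega, hk⟩

theorem sfreeF_spec : ∀ (fuel : Nat) (used : List Int) (k : Int),
    (∃ m, k ≤ m ∧ m < k + fuel ∧ m ∉ used) → IsSFree used k (sfreeF used fuel k) := by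
  intro fuel
  induction fuel with
  | zero => intro used k ⟨m, h1, h2, _⟩; omega
  | succ n ih =>
    intro used k hex
    by_cases hk : k ∈ used
    · have hex' : ∃ m, k + 1 ≤ m ∧ m < k + 1 + n ∧ m ∉ used := by
        obtain ⟨m, h1, h2, h3⟩ := hex
        have hne : m ≠ k := fun h => h3 (h ▸ hk)
        refine ⟨m, by omega, ?_, h3⟩
        push_cast at h2 ⊢
        omega
      have heq : sfreeF used (n+1) k = sfreeF used n (k+1) := by simp [sfreeF, hk]
      rw [heq]
      exact isSFree_succ_of_mem hk (ih used (k+1) hex')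
    · have heq : sfreeF used (n+1) k = k := by simp [sfreeF, hk]
      rw [heq]
      exact ⟨le_refl _, hk, fun j hj hjr => by omega⟩

theorem sfree_spec (used : List Int) (k : Int) :
    IsSFree used k (sfreeF used (used.length + 1) k) := by
  apply sfreeF_spec
  obtain ⟨m, h1, h2, h3⟩ := exists_free_le used.length used (le_refl _) k
  exact ⟨m, h1, by omega, h3⟩

theorem pyWhileNotIn_eq (d : PySem.Dict Int String) :
    ∀ (fuel : Nat) (k : Int), pyWhileNotIn d fuel k = sfreeF d.keys fuel k := by
  intro fuel
  induction fuel with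
  | zero => intro k; rfl
  | succ n ih =>
    intro k
    by_cases hk : k ∈ d.keys
    · simp [pyWhileNotIn, sfreeF, hk, PySem.Dict.contains_eq_decide_mem_keys, ih]
    · simp [pyWhileNotIn, sfreeF, hk, PySem.Dict.contains_eq_decide_mem_keys]

theorem size_eq_keys_length {κ ν : Type} [BEq κ] (d : PySem.Dict κ ν) :
    d.size = d.keys.length := by
  simp [PySem.Dict.size, PySem.Dict.keys]

theorem stepA_eq_stepM (d : PySem.Dict Int String) (pf : String × String) :
    (if d.contains (PySem.Str.len pf.2) = false then
        d.insert (PySem.Str.len pf.2) pf.1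
      else
        d.insert (pyWhileNotIn d (d.size + 1) (PySem.Str.len pf.2 + 1)) pf.1)
      = stepM d pf := by
  set L := PySem.Str.len pf.2 with hL
  by_cases hk : L ∈ d.keys
  · have hc : d.contains L = true := by
      simp [PySem.Dict.contains_eq_decide_mem_keys, hk]
    have h1 : IsSFree d.keys L (pyWhileNotIn d (d.size + 1) (L + 1)) := by
      rw [pyWhileNotIn_eq, size_eq_keys_length]
      exact isSFree_succ_of_mem hk (sfree_spec d.keys (L+1))
    have h2 := sfree_spec d.keys L
    rw [stepM, ← hL, ← isSFree_unique h1 h2]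
    simp [hc]
  · have hc : d.contains L = false := by
      simp [PySem.Dict.contains_eq_decide_mem_keys, hk]
    have : sfreeF d.keys (d.keys.length + 1) L = L := by
      simp [sfreeF, hk]
    rw [stepM, ← hL, this]
    simp [hc]

/-- Invariant tying B's pointer dict to the set of used keys. -/
def InvNxt (nxt : PySem.Dict Int Int) (used : List Int) : Prop :=
  (∀ k v, nxt.get? k = some v → k ∈ used ∧ k < v ∧ ∀ j, k ≤ j → j < v → j ∈ used) ∧
  (∀ k ∈ used, nxt.contains k = true)

theorem findFree_spec {nxt : PySem.Dict Int Int} {used : List Int} (hInv : InvNxt nxt used) :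
    ∀ (fuel : Nat) (k : Int), (∃ m, k ≤ m ∧ m < k + fuel ∧ m ∉ used) →
    IsSFree used k (findFree nxt fuel k) := by
  intro fuel
  induction fuel with
  | zero => intro k ⟨m, h1, h2, _⟩; omega
  | succ n ih =>
    intro k hex
    rcases hv : nxt.get? k with _ | v
    · have heq : findFree nxt (n+1) k = k := by simp [findFree, hv]
      have hk : k ∉ used := fun hmem => by
        have hc := hInv.2 k hmem
        rw [PySem.Dict.contains_eq_isSome_get?, hv] at hc
        simp at hc
      rw [heq]
      exact ⟨le_refl _, hk, fun j hj hjr => by omega⟩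
    · have heq : findFree nxt (n+1) k = findFree nxt n v := by simp [findFree, hv]
      obtain ⟨hkused, hkv, hint⟩ := hInv.1 k v hv
      have hex' : ∃ m, v ≤ m ∧ m < v + n ∧ m ∉ used := by
        obtain ⟨m, h1, h2, h3⟩ := hex
        have hvm : v ≤ m := by
          by_contra hmv
          exact h3 (hint m h1 (by omega))
        refine ⟨m, hvm, ?_, h3⟩
        push_cast at h2 ⊢
        omega
      obtain ⟨hle, hout, hall⟩ := ih v hex'
      rw [heq]
      refine ⟨by omega, hout, fun j hj hjr => ?_⟩
      by_cases hjv : j < v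
      · exact hint j hj hjv
      · exact hall j (by omega) hjr

theorem findFree_call_spec {nxt : PySem.Dict Int Int} {used : List Int}
    (hInv : InvNxt nxt used) (hnd : used.Nodup) (k : Int) :
    IsSFree used k (findFree nxt (nxt.size + 1) k) := by
  apply findFree_spec hInv
  have hsub : used ⊆ nxt.keys := fun x hx => by
    have := hInv.2 x hx
    rwa [PySem.Dict.contains_iff_mem_keys] at this
  have hlen : used.length ≤ nxt.size := by
    rw [size_eq_keys_length]
    exact (List.subperm_of_subset hnd hsub).length_le
  obtain ⟨m, h1, h2, h3⟩ := exists_free_le nxt.size used hlen k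
  exact ⟨m, h1, by omega, h3⟩

theorem invNxt_step {nxt : PySem.Dict Int Int} {used : List Int} {start r : Int}
    (hInv : InvNxt nxt used) (hr : IsSFree used start r) :
    InvNxt (if start ≠ r then (nxt.insert r (r+1)).insert start (r+1) else nxt.insert r (r+1))
      (used ++ [r]) := by
  obtain ⟨hsr, hrout, hall⟩ := hr
  have hstart_mem : start ≠ r → start ∈ used := by
    intro hne
    exact hall start (le_refl _) (lt_of_le_of_ne hsr hne)
  constructor
  · intro k v hv
    by_cases hne : start ≠ r
    · simp only [if_pos hne, PySem.Dict.get?_insert] at hv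
      split_ifs at hv with h1 h2
      · -- k = start, v = r + 1
        cases hv
        subst h1
        refine ⟨by simp [hstart_mem hne], by omega, fun j hj hjr => ?_⟩
        by_cases hjlt : j < r
        · simp [hall j hj hjlt]
        · simp [show j = r by omega]
      · -- k = r, v = r + 1
        cases hv
        subst h2
        refine ⟨by simp, by omega, fun j hj hjr => ?_⟩
        simp only [List.mem_append, List.mem_singleton]
        exact Or.inr (by omega)
      · obtain ⟨h1, h2, h3⟩ := hInv.1 k v hv
        exact ⟨by simp [h1], h2, fun j hj hjr => by simp [h3 j hj hjr]⟩
    · simp only [if_neg hne, PySem.Dict.get?_insert] at hv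
      split_ifs at hv with h1
      · cases hv
        subst h1
        refine ⟨by simp, by omega, fun j hj hjr => ?_⟩
        simp only [List.mem_append, List.mem_singleton]
        exact Or.inr (by omega)
      · obtain ⟨h1, h2, h3⟩ := hInv.1 k v hv
        exact ⟨by simp [h1], h2, fun j hj hjr => by simp [h3 j hj hjr]⟩
  · intro k hk
    rcases List.mem_append.mp hk with hk | hk
    · have := hInv.2 k hk
      split_ifs <;> simp [PySem.Dict.contains_insert, this]
    · simp only [List.mem_singleton] at hk
      subst hk
      split_ifs <;> simp [PySem.Dict.contains_insert]

theorem bloop_eq_model : ∀ (items : List (String × String))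
    (nxt : PySem.Dict Int Int) (res : PySem.Dict Int String),
    InvNxt nxt res.keys → res.keys.Nodup →
    (items.foldl
      (fun st pf =>
        let start := PySem.Str.len pf.2
        let k := findFree st.1 (st.1.size + 1) start
        let res := st.2.insert k pf.1
        let nxt := st.1.insert k (k + 1)
        let nxt := if start ≠ k then nxt.insert start (k + 1) else nxt
        (nxt, res))
      (nxt, res)).2 = items.foldl stepM res := by
  intro items
  induction items with
  | nil => intro nxt res _ _; rfl
  | cons pf rest ih =>
    intro nxt res hInv hnd
    simp only [List.foldl_cons]
    set L := PySem.Str.len pf.2 with hL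
    set r := findFree nxt (nxt.size + 1) L with hrdef
    have hr : IsSFree res.keys L r := findFree_call_spec hInv hnd L
    have hmodel : stepM res pf = res.insert r pf.1 := by
      rw [stepM, ← hL, isSFree_unique (sfree_spec res.keys L) hr]
    have hkeys : (res.insert r pf.1).keys = res.keys ++ [r] := by
      apply PySem.Dict.keys_insert_of_not_contains
      rw [PySem.Dict.contains_eq_decide_mem_keys]
      exact decide_eq_false hr.2.1
    have hnd' : (res.insert r pf.1).keys.Nodup := by
      rw [hkeys]
      exact hnd.append (List.nodup_singleton r) (List.disjoint_singleton.mpr hr.2.1)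
    have hInv' : InvNxt (if L ≠ r then (nxt.insert r (r+1)).insert L (r+1) else nxt.insert r (r+1))
        (res.insert r pf.1).keys := by
      rw [hkeys]; exact invNxt_step hInv hr
    rw [← hmodel] at *
    exact ih _ _ hInv' hnd'

theorem afold_eq_model (items : List (String × String)) (d : PySem.Dict Int String) :
    items.foldl
      (fun d pf =>
        if d.contains (PySem.Str.len pf.2) = false then
          d.insert (PySem.Str.len pf.2) pf.1
        else
          d.insert (pyWhileNotIn d (d.size + 1) (PySem.Str.len pf.2 + 1)) pf.1)
      d = items.foldl stepM d := by
  have hfun : (fun (d : PySem.Dict Int String) (pf : String × String) =>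
      if d.contains (PySem.Str.len pf.2) = false then
        d.insert (PySem.Str.len pf.2) pf.1
      else
        d.insert (pyWhileNotIn d (d.size + 1) (PySem.Str.len pf.2 + 1)) pf.1) = stepM := by
    funext d pf
    exact stepA_eq_stepM d pf
  rw [hfun]

theorem distinct_foldl : ∀ (items : List (String × String)) (d : PySem.Dict Int String),
    (items.map (fun pf => PySem.Str.len pf.2)).Nodup →
    (∀ pf ∈ items, PySem.Str.len pf.2 ∉ d.keys) →
    items.foldl stepM d = items.foldl (fun d pf => d.insert (PySem.Str.len pf.2) pf.1) d := by
  intro items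
  induction items with
  | nil => intro d _ _; rfl
  | cons pf rest ih =>
    intro d hnd hdisj
    simp only [List.map_cons, List.nodup_cons] at hnd
    have hout : PySem.Str.len pf.2 ∉ d.keys := hdisj pf (by simp)
    have hsf : sfreeF d.keys (d.keys.length + 1) (PySem.Str.len pf.2) = PySem.Str.len pf.2 := by
      have heq : sfreeF d.keys (d.keys.length + 1) (PySem.Str.len pf.2)
          = if PySem.Str.len pf.2 ∈ d.keys then
              sfreeF d.keys d.keys.length (PySem.Str.len pf.2 + 1)
            else PySem.Str.len pf.2 := by
        simp only [sfreeF]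
      rw [heq, if_neg hout]
    have hstep : stepM d pf = d.insert (PySem.Str.len pf.2) pf.1 := by rw [stepM, hsf]
    have hkeys2 : (d.insert (PySem.Str.len pf.2) pf.1).keys = d.keys ++ [PySem.Str.len pf.2] := by
      apply PySem.Dict.keys_insert_of_not_contains
      rw [PySem.Dict.contains_eq_decide_mem_keys]
      exact decide_eq_false hout
    simp only [List.foldl_cons, hstep]
    apply ih
    · exact hnd.2
    · intro qf hq
      rw [hkeys2]
      simp only [List.mem_append, List.mem_singleton]
      rintro (h | h)
      · exact hdisj qf (by simp [hq]) h
      · exact hnd.1 (h ▸ List.mem_map_of_mem hq)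

theorem nodup_of_length_ofList_eq (xs : List Int)
    (h : (PySem.Set.ofList xs).length = xs.length) : xs.Nodup := by
  have hperm : (PySem.Set.ofList xs).Perm xs.dedup := by
    rw [List.perm_ext_iff_of_nodup (PySem.Set.nodup_ofList xs) (List.nodup_dedup xs)]
    intro x
    simp [PySem.Set.mem_ofList, List.mem_dedup]
  have hlen : xs.dedup.length = xs.length := by rw [← hperm.length_eq, h]
  rw [← List.dedup_eq_self]
  exact (List.dedup_sublist xs).eq_of_length hlen

-- ===== VERDICT (by name: the statement is the Claim_ definition above) =====
theorem get_filelengths_py_spec : Claim_equal_get_filelengths_py := by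
  intro context _
  show get_filelengths_py context = get_filelengths_py_alt context
  have hA : get_filelengths_py context =
      (if (PySem.Dict.ofList context : PySem.Dict String String).size =
          (PySem.Set.ofList ((PySem.Dict.ofList context : PySem.Dict String String).values.map
            (fun file => PySem.Str.len file))).length then
        (PySem.Dict.ofList ((PySem.Dict.ofList context : PySem.Dict String String).items.map
          (fun pf => (PySem.Str.len pf.2, pf.1)))).items
      else
        ((PySem.Dict.ofList context : PySem.Dict String String).items.foldl
          (fun d pf =>
            if d.contains (PySem.Str.len pf.2) = false then
              d.insert (PySem.Str.len pf.2) pf.1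
            else
              d.insert (pyWhileNotIn d (d.size + 1) (PySem.Str.len pf.2 + 1)) pf.1)
          PySem.Dict.empty).items) := rfl
  have hBdef : get_filelengths_py_alt context =
      ((PySem.Dict.ofList context : PySem.Dict String String).items.foldl
        (fun st pf =>
          let start := PySem.Str.len pf.2
          let k := findFree st.1 (st.1.size + 1) start
          let res := st.2.insert k pf.1
          let nxt := st.1.insert k (k + 1)
          let nxt := if start ≠ k then nxt.insert start (k + 1) else nxt
          (nxt, res))
        (PySem.Dict.empty, PySem.Dict.empty)).2.items := rfl
  rw [hA, hBdef]
  generalize PySem.Dict.ofList context = ctx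
  have hB : (ctx.items.foldl
      (fun st pf =>
        let start := PySem.Str.len pf.2
        let k := findFree st.1 (st.1.size + 1) start
        let res := st.2.insert k pf.1
        let nxt := st.1.insert k (k + 1)
        let nxt := if start ≠ k then nxt.insert start (k + 1) else nxt
        (nxt, res))
      (PySem.Dict.empty, PySem.Dict.empty)).2 = ctx.items.foldl stepM PySem.Dict.empty := by
    apply bloop_eq_model
    · constructor
      · intro k v hv; simp [PySem.Dict.get?_empty] at hv
      · intro k hk; simp [PySem.Dict.keys_empty] at hk
    · simp [PySem.Dict.keys_empty]
  split_ifs with hcond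
  · -- all file lengths distinct: the comprehension equals the probing model
    have hlen : (PySem.Set.ofList (ctx.values.map (fun file => PySem.Str.len file))).length
        = (ctx.values.map (fun file => PySem.Str.len file)).length := by
      rw [← hcond]
      simp [PySem.Dict.size, PySem.Dict.values, List.length_map]
    have hnd0 := nodup_of_length_ofList_eq _ hlen
    have hmapeq : ctx.values.map (fun file => PySem.Str.len file)
        = ctx.items.map (fun pf => PySem.Str.len pf.2) := by
      simp [PySem.Dict.values, List.map_map, Function.comp]
    rw [hmapeq] at hnd0
    rw [hB, distinct_foldl ctx.items PySem.Dict.empty hnd0 (by simp [PySem.Dict.keys_empty])]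
    have hof : ∀ (l : List (Int × String)),
        PySem.Dict.ofList l = l.foldl (fun d p => d.insert p.1 p.2) PySem.Dict.empty :=
      fun _ => rfl
    rw [hof, List.foldl_map]
  · rw [hB, afold_eq_model]
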